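-- pv_equiv track=rewrite | github.com/muhammadsyaddad/animation-engine | agent-api/agents/tools/danim_templates.py | _detect_entity_col
-- ===== SOURCE A (Python) =====
-- from typing import Dict, List, Tuple, Optional
-- from typing import Sequence
--
-- def _detect_entity_col(headers: Sequence[str]) -> Optional[str]:
--     """
--     Best-effort detection of an entity/name identifier column in the dataset.
--     Accepts any Sequence[str] for flexibility (list, tuple, etc.).
--     """
--     candidates = [
--         "entity", "name", "country", "label", "id", "Entity", "Name", "Country", "Label", "ID"
--     ]
--     lower_headers = {h.lower(): h for h in headers}
--     for cand in candidates:
--         if cand.lower() in lower_headers: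
--             return lower_headers[cand.lower()]
--     return None
-- ===== SOURCE B (Python) =====
-- from typing import Optional, Sequence
--
-- _RANKS = {"entity": 0, "name": 1, "country": 2, "label": 3, "id": 4}
--
-- def _detect_entity_col(headers: Sequence[str]) -> Optional[str]:
--     """Single pass: keep the header whose lowercase has the smallest rank; ties -> last wins."""
--     best = None  # (rank, header)
--     for h in headers:
--         r = _RANKS.get(h.lower())
--         if r is not None and (best is None or r <= best[0]):
--             best = (r, h)
--     return best[1] if best is not None else None
-- ===== Notes on version B (the rewrite author's own statement) =====
-- stated objective: simpler
-- what changed: Instead of building a lowercase->header dict of all headers and then scanning the candidate list, B maps the five candidate names to ranks once and makes a single pass over the headers keeping the minimal-rank header (ties overwritten so the last occurrence wins, as in A's dict comprehension).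
import Mathlib
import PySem

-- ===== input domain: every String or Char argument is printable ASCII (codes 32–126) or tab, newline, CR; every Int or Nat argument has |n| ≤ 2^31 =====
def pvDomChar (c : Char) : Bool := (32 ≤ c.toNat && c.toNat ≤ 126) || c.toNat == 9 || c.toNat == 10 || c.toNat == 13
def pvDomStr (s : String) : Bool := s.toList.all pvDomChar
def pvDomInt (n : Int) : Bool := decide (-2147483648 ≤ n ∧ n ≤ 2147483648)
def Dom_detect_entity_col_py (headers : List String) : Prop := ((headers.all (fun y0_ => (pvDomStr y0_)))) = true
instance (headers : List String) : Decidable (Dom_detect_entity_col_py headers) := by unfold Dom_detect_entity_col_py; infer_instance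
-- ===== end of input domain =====

-- B replaces A's header-dict + candidate scan by one min-rank pass over the headers (objective: simpler).

-- ===== PORT A =====
-- 'for cand in candidates: if cand.lower() in lower_headers: return lower_headers[cand.lower()]'
def pvFindCand (d : PySem.Dict String String) : List String → Option String
  | [] => none
  | c :: cs =>
    match d.get? (PySem.Str.lower c) with
    | some v => some v
    | none => pvFindCand d cs

def detect_entity_col_py (headers : List String) : Option String :=
  let candidates : List String :=
    ["entity", "name", "country", "label", "id", "Entity", "Name", "Country", "Label", "ID"]
  let lowerHeaders : PySem.Dict String String :=
    headers.foldl (fun d h => d.insert (PySem.Str.lower h) h) PySem.Dict.empty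
  pvFindCand lowerHeaders candidates

-- ===== PORT B =====
def pvRanks : PySem.Dict String Int :=
  ((((PySem.Dict.empty.insert "entity" 0).insert "name" 1).insert "country" 2).insert "label" 3).insert "id" 4

def pvStep (best : Option (Int × String)) (h : String) : Option (Int × String) :=
  match pvRanks.get? (PySem.Str.lower h) with
  | some r =>
    match best with
    | none => some (r, h)
    | some (br, _) => if r ≤ br then some (r, h) else best
  | none => best

def detect_entity_col_py_alt (headers : List String) : Option String :=
  (headers.foldl pvStep none).map (·.2)

-- ===== PRECONDITION & SPEC =====
def Spec_detect_entity_col_py (headers : List String) (out : Option String) : Prop := out = detect_entity_col_py_alt headers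
instance (headers : List String) (out : Option String) : Decidable (Spec_detect_entity_col_py headers out) := by unfold Spec_detect_entity_col_py; infer_instance

-- ===== CLAIM (what is proved, stated in full; the proofs are below) =====
def Claim_equal_detect_entity_col_py : Prop := ∀ (headers : List String), Dom_detect_entity_col_py headers → Spec_detect_entity_col_py headers (detect_entity_col_py headers)

-- ===== LEMMAS AND PROOFS =====

def pvKey (r : Int) : String :=
  if r = 0 then "entity" else if r = 1 then "name" else if r = 2 then "country"
  else if r = 3 then "label" else "id"

-- invariant tying A's dict to B's running best
def pvInv (d : PySem.Dict String String) (best : Option (Int × String)) : Prop :=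
  match best with
  | none => ∀ r : Int, 0 ≤ r → r ≤ 4 → d.get? (pvKey r) = none
  | some (r, x) => (0 ≤ r ∧ r ≤ 4) ∧ d.get? (pvKey r) = some x ∧
      ∀ r' : Int, 0 ≤ r' → r' < r → d.get? (pvKey r') = none

theorem pvRanks_get (s : String) :
    pvRanks.get? s = if s = "id" then some 4 else if s = "label" then some 3
      else if s = "country" then some 2 else if s = "name" then some 1
      else if s = "entity" then some 0 else none := by
  simp [pvRanks, PySem.Dict.get?_insert]

theorem pvKey_inj {r r' : Int} (h0 : 0 ≤ r') (h1 : r' < r) (h2 : r ≤ 4) :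
    pvKey r' ≠ pvKey r := by
  unfold pvKey
  split_ifs <;> simp_all <;> omega

theorem pvKey_ne_of_norank {h : String}
    (hA : ¬PySem.Str.lower h = "id") (hB : ¬PySem.Str.lower h = "label")
    (hC : ¬PySem.Str.lower h = "country") (hD : ¬PySem.Str.lower h = "name")
    (hE : ¬PySem.Str.lower h = "entity") (r : Int) : pvKey r ≠ PySem.Str.lower h := by
  unfold pvKey
  split_ifs <;>
    first
      | exact fun e => hA e.symm
      | exact fun e => hB e.symm
      | exact fun e => hC e.symm
      | exact fun e => hD e.symm
      | exact fun e => hE e.symm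

theorem pvInv_step (d : PySem.Dict String String) (best : Option (Int × String)) (h : String)
    (hinv : pvInv d best) :
    pvInv (d.insert (PySem.Str.lower h) h) (pvStep best h) := by
  unfold pvStep
  rcases hr : pvRanks.get? (PySem.Str.lower h) with _ | r
  · -- lower h is none of the five keys: best and every relevant lookup unchanged
    rw [pvRanks_get] at hr
    split_ifs at hr with hA hB hC hD hE
    cases best with
    | none =>
      intro r h0 h4
      rw [PySem.Dict.get?_insert_of_ne _ _ (pvKey_ne_of_norank hA hB hC hD hE r)]
      exact hinv r h0 h4
    | some p =>
      obtain ⟨⟨hb0, hb4⟩, hkey, hlt⟩ := hinv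
      refine ⟨⟨hb0, hb4⟩, ?_, ?_⟩
      · rw [PySem.Dict.get?_insert_of_ne _ _ (pvKey_ne_of_norank hA hB hC hD hE _)]
        exact hkey
      · intro r' h0 h1
        rw [PySem.Dict.get?_insert_of_ne _ _ (pvKey_ne_of_norank hA hB hC hD hE _)]
        exact hlt r' h0 h1
  · -- lower h has rank r, i.e. lower h = pvKey r with 0 ≤ r ≤ 4
    rw [pvRanks_get] at hr
    have hkr : PySem.Str.lower h = pvKey r ∧ 0 ≤ r ∧ r ≤ 4 := by
      split_ifs at hr with hA hB hC hD hE <;>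
        (injection hr with hr; subst hr) <;>
        refine ⟨by norm_num [pvKey]; assumption, by omega, by omega⟩
    obtain ⟨hk, hr0, hr4⟩ := hkr
    cases best with
    | none =>
      refine ⟨⟨hr0, hr4⟩, ?_, ?_⟩
      · rw [hk, PySem.Dict.get?_insert_self]
      · intro r' h0 h1
        rw [hk, PySem.Dict.get?_insert_of_ne _ _ (pvKey_inj h0 h1 hr4)]
        exact hinv r' h0 (by omega)
    | some p =>
      obtain ⟨br, x⟩ := p
      obtain ⟨⟨hb0, hb4⟩, hkey, hlt⟩ := hinv
      by_cases hle : r ≤ br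
      · simp only [if_pos hle]
        refine ⟨⟨hr0, hr4⟩, ?_, ?_⟩
        · rw [hk, PySem.Dict.get?_insert_self]
        · intro r' h0 h1
          rw [hk, PySem.Dict.get?_insert_of_ne _ _ (pvKey_inj h0 h1 hr4)]
          exact hlt r' h0 (by omega)
      · simp only [if_neg hle]
        refine ⟨⟨hb0, hb4⟩, ?_, ?_⟩
        · rw [hk, PySem.Dict.get?_insert_of_ne _ _ (pvKey_inj hb0 (by omega) hr4)]
          exact hkey
        · intro r' h0 h1
          rw [hk, PySem.Dict.get?_insert_of_ne _ _ (pvKey_inj h0 (by omega) hr4)]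
          exact hlt r' h0 h1

theorem pvFindCand_of_inv (d : PySem.Dict String String) (best : Option (Int × String))
    (hinv : pvInv d best) :
    pvFindCand d ["entity", "name", "country", "label", "id",
                  "Entity", "Name", "Country", "Label", "ID"] = best.map (·.2) := by
  cases best with
  | none =>
    have h0 := hinv 0 (by omega) (by omega)
    have h1 := hinv 1 (by omega) (by omega)
    have h2 := hinv 2 (by omega) (by omega)
    have h3 := hinv 3 (by omega) (by omega)
    have h4 := hinv 4 (by omega) (by omega)
    simp only [pvKey] at h0 h1 h2 h3 h4
    norm_num at h0 h1 h2 h3 h4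
    simp [pvFindCand, show PySem.Str.lower "entity" = "entity" from by decide,
      show PySem.Str.lower "name" = "name" from by decide,
      show PySem.Str.lower "country" = "country" from by decide,
      show PySem.Str.lower "label" = "label" from by decide,
      show PySem.Str.lower "id" = "id" from by decide,
      show PySem.Str.lower "Entity" = "entity" from by decide,
      show PySem.Str.lower "Name" = "name" from by decide,
      show PySem.Str.lower "Country" = "country" from by decide,
      show PySem.Str.lower "Label" = "label" from by decide,
      show PySem.Str.lower "ID" = "id" from by decide,
      h0, h1, h2, h3, h4]
  | some p =>
    obtain ⟨r, x⟩ := p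
    obtain ⟨⟨hr0, hr4⟩, hkey, hlt⟩ := hinv
    interval_cases r <;>
      [ (have := hkey);
        (have l0 := hlt 0 (by omega) (by omega); have := hkey);
        (have l0 := hlt 0 (by omega) (by omega); have l1 := hlt 1 (by omega) (by omega); have := hkey);
        (have l0 := hlt 0 (by omega) (by omega); have l1 := hlt 1 (by omega) (by omega);
         have l2 := hlt 2 (by omega) (by omega); have := hkey);
        (have l0 := hlt 0 (by omega) (by omega); have l1 := hlt 1 (by omega) (by omega);
         have l2 := hlt 2 (by omega) (by omega); have l3 := hlt 3 (by omega) (by omega); have := hkey)] <;>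
    simp_all [pvKey, pvFindCand,
      show PySem.Str.lower "entity" = "entity" from by decide,
      show PySem.Str.lower "name" = "name" from by decide,
      show PySem.Str.lower "country" = "country" from by decide,
      show PySem.Str.lower "label" = "label" from by decide,
      show PySem.Str.lower "id" = "id" from by decide]

theorem pvInv_fold (headers : List String) :
    pvInv (headers.foldl (fun d h => d.insert (PySem.Str.lower h) h) PySem.Dict.empty)
          (headers.foldl pvStep none) := by
  induction headers using List.reverseRecOn with
  | nil =>
    intro r _ _
    exact PySem.Dict.get?_empty _
  | append_singleton hs h ih =>
    rw [List.foldl_append, List.foldl_append]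
    exact pvInv_step _ _ h ih

-- ===== VERDICT (by name: the statement is the Claim_ definition above) =====
theorem detect_entity_col_py_spec : Claim_equal_detect_entity_col_py := by
  intro headers _
  unfold Spec_detect_entity_col_py detect_entity_col_py detect_entity_col_py_alt
  exact pvFindCand_of_inv _ _ (pvInv_fold headers)
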